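-- pv_equiv track=rewrite | github.com/gozepolat/priors | reusability/reusability/common.py | get_all_non_empty_subsets
-- ===== SOURCE A (Python) =====
-- def get_all_non_empty_subsets(items: list) -> list:
--     """Return a list of all subsets of given items except for the empty set
--
--     size is always pow(2,n) - 1 => len(get_all_non_empty_subsets([2, 3, 4, 5, 6, 7])) == 63"""
--     if not items:
--         return []
--
--     subsets = []
--     while len(items) > 0:
--         last = items.pop()
--         subsets_without_items = get_all_non_empty_subsets(items)
--         subsets.append([last])
--         subsets.extend(subsets_without_items)
--         subsets.extend([[last] + subset for subset in subsets_without_items if subset])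
--
--     return subsets
-- ===== SOURCE B (Python) =====
-- def get_all_non_empty_subsets(items: list) -> list:
--     """Return a list of all subsets of given items except for the empty set
--
--     Iterative re-implementation; like the original, it empties `items`."""
--     popped = []
--     while items:
--         popped.append(items.pop())
--     subsets = []
--     for x in reversed(popped):
--         subsets = [[x]] + subsets + [[x] + s for s in subsets]
--     return subsets
-- ===== Notes on version B (the rewrite author's own statement) =====
-- stated objective: alternative
-- what changed: Replaces the recursive pop-and-recurse scheme with a single iterative left fold that rebuilds the subset list from an empty accumulator (still emptying the input list in place).
import Mathlib
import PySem

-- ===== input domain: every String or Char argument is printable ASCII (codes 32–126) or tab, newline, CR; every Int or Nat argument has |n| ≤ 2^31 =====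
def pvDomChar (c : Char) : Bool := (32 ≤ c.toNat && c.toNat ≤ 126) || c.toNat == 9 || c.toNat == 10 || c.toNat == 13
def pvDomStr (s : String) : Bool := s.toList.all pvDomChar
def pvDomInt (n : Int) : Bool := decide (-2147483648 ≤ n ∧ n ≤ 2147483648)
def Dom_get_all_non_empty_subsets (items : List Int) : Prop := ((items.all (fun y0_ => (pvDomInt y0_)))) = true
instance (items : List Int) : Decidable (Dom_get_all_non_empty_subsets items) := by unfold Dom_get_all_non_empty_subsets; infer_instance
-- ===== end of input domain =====

-- ===== PORT A =====
-- B differs only in algorithm: both Pythons empty `items` in place; the theorems are about the return value.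
-- A: one while-iteration (the recursive call empties `items`): pop the last element, recurse on the rest,
-- then [[last]] ++ sub ++ [[last]+s for s in sub if s].
def get_all_non_empty_subsets (items : List Int) : List (List Int) :=
  if h : items = [] then []
  else
    let last := items.getLast h
    let sub := get_all_non_empty_subsets items.dropLast
    [last] :: (sub ++ (sub.filter (fun s => !s.isEmpty)).map (fun s => last :: s))
termination_by items.length
decreasing_by
  simpa [List.length_dropLast] using Nat.sub_lt (List.length_pos_iff.2 h) Nat.one_pos

-- ===== PORT B =====
-- while items: popped.append(items.pop())
def pvDrain (items popped : List Int) : List Int :=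
  if h : items = [] then popped
  else pvDrain items.dropLast (popped ++ [items.getLast h])
termination_by items.length
decreasing_by
  simpa [List.length_dropLast] using Nat.sub_lt (List.length_pos_iff.2 h) Nat.one_pos

def get_all_non_empty_subsets_alt (items : List Int) : List (List Int) :=
  let popped := pvDrain items []
  popped.reverse.foldl (fun subsets x => [x] :: (subsets ++ subsets.map (fun s => x :: s))) []

-- ===== PRECONDITION & SPEC =====
def Spec_get_all_non_empty_subsets (items : List Int) (out : List (List Int)) : Prop := out = get_all_non_empty_subsets_alt items
instance (items : List Int) (out : List (List Int)) : Decidable (Spec_get_all_non_empty_subsets items out) := by unfold Spec_get_all_non_empty_subsets; infer_instance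

-- ===== CLAIM (what is proved, stated in full; the proofs are below) =====
def Claim_equal_get_all_non_empty_subsets : Prop := ∀ (items : List Int), Dom_get_all_non_empty_subsets items → Spec_get_all_non_empty_subsets items (get_all_non_empty_subsets items)

-- ===== LEMMAS AND PROOFS =====

lemma pvDrain_eq (items : List Int) : ∀ acc, pvDrain items acc = acc ++ items.reverse := by
  induction items using get_all_non_empty_subsets.induct with
  | case1 => intro acc; simp [pvDrain]
  | case2 items h ih =>
    intro acc
    rw [pvDrain]
    simp only [h, dite_false, ih]
    conv_rhs => rw [← List.dropLast_append_getLast h]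
    simp

lemma nil_not_mem (items : List Int) : [] ∉ get_all_non_empty_subsets items := by
  induction items using get_all_non_empty_subsets.induct with
  | case1 => simp [get_all_non_empty_subsets]
  | case2 items h ih =>
    rw [get_all_non_empty_subsets]
    simp only [h, dite_false]
    intro hm
    simp only [List.mem_cons, List.mem_append, List.mem_map, List.mem_filter] at hm
    rcases hm with hm | hm | ⟨s, _, hs⟩
    · exact absurd hm (by simp)
    · exact ih hm
    · exact absurd hs (by simp)

lemma foldl_eq (items : List Int) :
    get_all_non_empty_subsets items =
      items.foldl (fun subsets x => [x] :: (subsets ++ subsets.map (fun s => x :: s))) [] := by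
  induction items using List.reverseRecOn with
  | nil => simp [get_all_non_empty_subsets]
  | append_singleton ys x ih =>
    rw [get_all_non_empty_subsets]
    have hne : ys ++ [x] ≠ [] := by simp
    simp only [hne, dite_false, List.getLast_append_singleton (l := ys),
      List.dropLast_concat, List.foldl_append, List.foldl_cons, List.foldl_nil, ← ih]
    congr 2
    rw [List.filter_eq_self.2]
    intro s hs
    have : s ≠ [] := fun e => nil_not_mem ys (e ▸ hs)
    simpa using this

-- ===== VERDICT (by name: the statement is the Claim_ definition above) =====
theorem get_all_non_empty_subsets_spec : Claim_equal_get_all_non_empty_subsets := by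
  intro items _
  unfold Spec_get_all_non_empty_subsets get_all_non_empty_subsets_alt
  rw [pvDrain_eq, foldl_eq]
  simp
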